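-- pv_equiv track=rewrite | github.com/mcagriardic/Search-Sort-Algorithms | ctci/compute_pattern.py | next_pattern_index
-- ===== SOURCE A (Python) =====
-- def next_pattern_index(cs, p):
--     i = 0
--     j = 0
--     # pc -> pattern count
--     pc = 0
--     # collects the matched characters that are
--     # unable to complete the pattern cycle
--     # e.g. catcatca -> ca makes a partial match
--     # with the pattern "cat". We substract the
--     # length of this container from the index
--     # tch -> temp cycle holder
--     tch = []
--     while i < len(cs):
--         if cs[i] == p[j]:
--             tch.append(cs[i])
--             i += 1
--             j += 1
--             if j == len(p):
--                 pc += 1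
--                 j = 0
--                 tch = []
--         else:
--             break
--
--     return i - len(tch), ("".join(p), pc)
-- ===== SOURCE B (Python) =====
-- def next_pattern_index(cs, p):
--     lp = len(p)
--     if lp == 0:
--         # without this guard the block loop below would never terminate
--         return 0, ("".join(p), 0)
--     pc = 0
--     rest = list(cs)
--     while rest[:lp] == list(p):
--         pc += 1
--         rest = rest[lp:]
--     return pc * lp, ("".join(p), pc)
-- ===== Notes on version B (the rewrite author's own statement) =====
-- stated objective: simpler
-- what changed: Replaces the index/cycle-holder state machine (i, j, pc, tch) by a block comparison: repeatedly slice off a len(p)-sized prefix while it equals p and count the slices.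
-- outside the precondition, e.g. on next_pattern_index(['a'], []): A raises IndexError, B returns (0, ('', 0))
import Mathlib
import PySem

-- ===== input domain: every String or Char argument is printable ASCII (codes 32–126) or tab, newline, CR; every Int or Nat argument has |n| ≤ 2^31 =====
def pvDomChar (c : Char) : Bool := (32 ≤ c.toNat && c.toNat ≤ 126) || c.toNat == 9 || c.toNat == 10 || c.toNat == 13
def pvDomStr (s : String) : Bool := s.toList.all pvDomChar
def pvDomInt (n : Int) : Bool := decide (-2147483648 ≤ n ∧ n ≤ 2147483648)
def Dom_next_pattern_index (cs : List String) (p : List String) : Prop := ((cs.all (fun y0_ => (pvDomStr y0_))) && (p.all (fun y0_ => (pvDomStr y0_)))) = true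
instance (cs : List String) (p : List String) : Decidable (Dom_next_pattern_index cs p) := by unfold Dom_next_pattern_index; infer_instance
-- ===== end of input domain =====

-- B replaces A's index/cycle-holder state machine by a block comparison loop (objective: simpler).

-- ===== PORT A =====
-- Fuel-indexed transliteration of A's while loop; fuel = cs.length - i at every call,
-- so the fuel-0 branch coincides with the loop's `i < len(cs)` exit (same return expression).
-- cs[i] / p[j] are `getD`: i < cs.length is guarded, and j < p.length holds throughout
-- whenever p ≠ [] (Pre_ excludes p = [] with cs ≠ [], where Python raises IndexError).
def loopA (cs p : List String) : Nat → Nat → Nat → Int → List String → Int × (String × Int)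
  | 0, i, _j, pc, tch => ((i : Int) - tch.length, (String.join p, pc))
  | fuel+1, i, j, pc, tch =>
    if i < cs.length then
      if cs.getD i "" = p.getD j "" then
        if j + 1 = p.length then loopA cs p fuel (i+1) 0 (pc+1) []
        else loopA cs p fuel (i+1) (j+1) pc (tch ++ [cs.getD i ""])
      else ((i : Int) - tch.length, (String.join p, pc))
    else ((i : Int) - tch.length, (String.join p, pc))

def next_pattern_index (cs : List String) (p : List String) : Int × (String × Int) :=
  loopA cs p cs.length 0 0 0 []

-- ===== PORT B =====
-- Transliteration of B's block loop; iterations are bounded by cs.length, so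
-- fuel = cs.length + 1 makes the fuel-0 branch unreachable (proved in the lemmas below).
def loopB (p : List String) : Nat → List String → Int → Int × (String × Int)
  | 0, _rest, pc => (pc * (p.length : Int), (String.join p, pc))
  | fuel+1, rest, pc =>
    if rest.take p.length = p then loopB p fuel (rest.drop p.length) (pc+1)
    else (pc * (p.length : Int), (String.join p, pc))

def next_pattern_index_alt (cs : List String) (p : List String) : Int × (String × Int) :=
  if p.length = 0 then (0, (String.join p, 0))
  else loopB p (cs.length + 1) cs 0

-- ===== PRECONDITION & SPEC =====
-- Pre_ excludes exactly the inputs where A raises IndexError: p empty while cs is non-empty (p[0] fails).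
def Pre_next_pattern_index (cs : List String) (p : List String) : Prop := p ≠ [] ∨ cs = []
instance (cs : List String) (p : List String) : Decidable (Pre_next_pattern_index cs p) := by
  unfold Pre_next_pattern_index; infer_instance
def pvWitness_next_pattern_index : List String × List String := (["c","a","t","c","a","t","c","a"], ["c","a","t"])


def Spec_next_pattern_index (cs : List String) (p : List String) (out : Int × (String × Int)) : Prop := out = next_pattern_index_alt cs p
instance (cs : List String) (p : List String) (out : Int × (String × Int)) : Decidable (Spec_next_pattern_index cs p out) := by unfold Spec_next_pattern_index; infer_instance

-- ===== CLAIM (what is proved, stated in full; the proofs are below) =====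
def Claim_equal_next_pattern_index : Prop := ∀ (cs : List String) (p : List String), Dom_next_pattern_index cs p → Pre_next_pattern_index cs p → Spec_next_pattern_index cs p (next_pattern_index cs p)

-- ===== LEMMAS AND PROOFS =====

def addFst (n : Nat) (r : Int × (String × Int)) : Int × (String × Int) := (r.1 + n, r.2)

-- peeling the head of cs shifts loopA's absolute index (and hence its first component) by one
theorem shiftA (p : List String) (x : String) (cs' : List String) :
    ∀ (fuel i j : Nat) (pc : Int) (tch : List String),
      loopA (x :: cs') p fuel (i+1) j pc tch = addFst 1 (loopA cs' p fuel i j pc tch) := by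
  intro fuel
  induction fuel with
  | zero => intro i j pc tch; simp [loopA, addFst]; ring
  | succ n ih =>
    intro i j pc tch
    simp only [loopA, List.length_cons, Nat.add_lt_add_iff_right, List.getD_cons_succ]
    split_ifs with h1 h2 h3
    · exact ih (i+1) 0 (pc+1) []
    · exact ih (i+1) (j+1) pc (tch ++ [List.getD cs' i ""])
    · simp [addFst]; ring
    · simp [addFst]; ring

-- from drop j p = x :: q' read off p.getD j = x
theorem getD_of_drop (p : List String) (j : Nat) (x : String) (q' : List String)
    (h : p.drop j = x :: q') : p.getD j "" = x := by
  have hj : p[j]? = some x := by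
    have h0 := (List.getElem?_drop : (List.drop j p)[0]? = p[j+0]?)
    rw [h] at h0; simpa using h0.symm
  simp [List.getD, hj]

-- one unfolding of loopA at positive fuel (used after rewriting the fuel into successor form)
theorem loopA_step (cs p : List String) (fuel i j : Nat) (pc : Int) (tch : List String) :
    loopA cs p (fuel+1) i j pc tch =
    (if i < cs.length then
      if cs.getD i "" = p.getD j "" then
        if j + 1 = p.length then loopA cs p fuel (i+1) 0 (pc+1) []
        else loopA cs p fuel (i+1) (j+1) pc (tch ++ [cs.getD i ""])
      else ((i : Int) - tch.length, (String.join p, pc))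
    else ((i : Int) - tch.length, (String.join p, pc))) := rfl

-- a full remaining cycle q = p.drop j matches: one pattern count, then restart on rest
theorem matchRun (p : List String) (_hp : p ≠ []) :
    ∀ (q rest : List String) (j : Nat) (pc : Int) (tch : List String),
      p.drop j = q → q ≠ [] → tch.length = j →
      loopA (q ++ rest) p (q.length + rest.length) 0 j pc tch
        = addFst q.length (loopA rest p rest.length 0 0 (pc + 1) []) := by
  intro q
  induction q with
  | nil => intro _ _ _ _ _ h; exact absurd rfl h
  | cons x q' ih =>
    intro rest j pc tch hdrop _ htch
    have hx : p.getD j "" = x := getD_of_drop p j x q' hdrop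
    have hjlen : p.length - j = q'.length + 1 := by
      have := congrArg List.length hdrop; simpa using this
    have hfe : (x :: q').length + rest.length = (q'.length + rest.length) + 1 := by
      simp [Nat.add_right_comm]
    rw [List.cons_append, hfe, loopA_step]
    rw [if_pos (by simp : 0 < (x :: (q' ++ rest)).length)]
    rw [List.getD_cons_zero, if_pos hx.symm]
    by_cases hq' : q' = []
    · subst hq'
      simp only [List.length_nil, List.length_cons] at hjlen hfe
      have : j + 1 = p.length := by omega
      rw [if_pos this]
      have := shiftA p x rest rest.length 0 0 (pc+1) []
      simpa [addFst] using this
    · have hne : j + 1 ≠ p.length := by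
        have : q'.length > 0 := List.length_pos_iff.mpr hq'
        omega
      rw [if_neg hne]
      have hstep := shiftA p x (q' ++ rest) (q'.length + rest.length) 0 (j+1) pc (tch ++ [x])
      have hdrop' : p.drop (j+1) = q' := by
        have : (p.drop j).drop 1 = q' := by rw [hdrop]; simp
        simpa [List.drop_drop, Nat.add_comm] using this
      have hih := ih rest (j+1) pc (tch ++ [x]) hdrop' hq' (by simp [htch])
      rw [hstep, hih]
      simp [addFst]; ring_nf

-- the remaining cycle q = p.drop j fails to match (mismatch or cs exhausted): break with i - len(tch) = -j
theorem failRun (p : List String) :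
    ∀ (q cs : List String) (j : Nat) (pc : Int) (tch : List String),
      p.drop j = q → ¬ (q <+: cs) → tch.length = j →
      loopA cs p cs.length 0 j pc tch = (-(j : Int), (String.join p, pc)) := by
  intro q
  induction q with
  | nil => intro cs j pc tch _ hnp; exact absurd (List.nil_prefix) hnp
  | cons x q' ih =>
    intro cs j pc tch hdrop hnp htch
    have hx : p.getD j "" = x := getD_of_drop p j x q' hdrop
    cases cs with
    | nil => simp [loopA, htch]
    | cons c cs' =>
      rw [show (c :: cs').length = cs'.length + 1 from rfl, loopA_step]
      rw [if_pos (by simp : 0 < (c :: cs').length), List.getD_cons_zero]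
      by_cases hc : c = p.getD j ""
      · rw [if_pos hc]
        have hcx : c = x := by rw [hc, hx]
        have hq' : q' ≠ [] := by
          intro h; subst h
          exact hnp ⟨cs', by simp [hcx]⟩
        have hjlen : p.length - j = q'.length + 1 := by
          have := congrArg List.length hdrop; simpa using this
        have hne : j + 1 ≠ p.length := by
          have : q'.length > 0 := List.length_pos_iff.mpr hq'
          omega
        rw [if_neg hne]
        have hstep := shiftA p c cs' cs'.length 0 (j+1) pc (tch ++ [c])
        rw [hstep]
        have hdrop' : p.drop (j+1) = q' := by
          have : (p.drop j).drop 1 = q' := by rw [hdrop]; simp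
          simpa [List.drop_drop, Nat.add_comm] using this
        have hnp' : ¬ (q' <+: cs') := by
          intro h; apply hnp; subst hcx; exact List.cons_prefix_cons.mpr ⟨rfl, h⟩
        rw [ih cs' (j+1) pc (tch ++ [c]) hdrop' hnp' (by simp [htch])]
        simp [addFst]
      · rw [if_neg hc]
        simp [htch]

-- loopB ignores extra fuel once fuel ≥ rest.length + 1
theorem loopB_fuel (p : List String) (hp : p ≠ []) :
    ∀ (n fuel₁ fuel₂ : Nat) (rest : List String) (pc : Int),
      rest.length < n → rest.length + 1 ≤ fuel₁ → rest.length + 1 ≤ fuel₂ →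
      loopB p fuel₁ rest pc = loopB p fuel₂ rest pc := by
  intro n
  induction n with
  | zero => intro _ _ _ _ h; omega
  | succ m ih =>
    intro fuel₁ fuel₂ rest pc hlt h1 h2
    obtain ⟨f₁, rfl⟩ : ∃ f, fuel₁ = f + 1 := ⟨fuel₁ - 1, by omega⟩
    obtain ⟨f₂, rfl⟩ : ∃ f, fuel₂ = f + 1 := ⟨fuel₂ - 1, by omega⟩
    simp only [loopB]
    by_cases h : rest.take p.length = p
    · rw [if_pos h, if_pos h]
      have hplen : 0 < p.length := List.length_pos_iff.mpr hp
      have hresl : p.length ≤ rest.length := by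
        have := congrArg List.length h
        simp [Nat.min_def] at this
        omega
      have hd : (rest.drop p.length).length = rest.length - p.length := by simp
      exact ih f₁ f₂ (rest.drop p.length) (pc+1) (by omega) (by omega) (by omega)
    · rw [if_neg h, if_neg h]

-- main induction: with p ≠ [], A's loop from a fresh cycle equals B's block loop (up to pc·|p| already consumed)
theorem mainAB (p : List String) (hp : p ≠ []) :
    ∀ (n : Nat) (cs : List String), cs.length ≤ n → ∀ (pc : Int),
      (loopA cs p cs.length 0 0 pc []).1 + pc * p.length = (loopB p (cs.length + 1) cs pc).1
      ∧ (loopA cs p cs.length 0 0 pc []).2 = (loopB p (cs.length + 1) cs pc).2 := by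
  intro n
  induction n with
  | zero =>
    intro cs hcs pc
    have : cs = [] := List.length_eq_zero_iff.mp (by omega)
    subst this
    simp only [loopB, List.length_nil]
    have hnp : ¬ (p <+: ([] : List String)) := by
      intro h; exact hp (List.prefix_nil.mp h)
    rw [if_neg (by simpa [List.prefix_iff_eq_take, eq_comm] using hnp)]
    simp [loopA]
  | succ m ih =>
    intro cs hcs pc
    by_cases hpre : p <+: cs
    · obtain ⟨rest, rfl⟩ := hpre
      have hA := matchRun p hp p rest 0 pc [] (by simp) hp rfl
      simp only [List.length_append] at hA ⊢
      rw [hA]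
      have hplen : 0 < p.length := List.length_pos_iff.mpr hp
      have hB : loopB p (p.length + rest.length + 1) (p ++ rest) pc
          = loopB p (p.length + rest.length) rest (pc + 1) := by
        simp only [loopB]
        rw [if_pos (by simp), List.drop_left]
      rw [hB]
      have hBf : loopB p (p.length + rest.length) rest (pc+1)
          = loopB p (rest.length + 1) rest (pc+1) :=
        loopB_fuel p hp (rest.length + 1) _ _ rest (pc+1) (by omega) (by omega) (by omega)
      rw [hBf]
      have hrest : rest.length ≤ m := by
        simp [List.length_append] at hcs; omega
      obtain ⟨ih1, ih2⟩ := ih rest hrest (pc + 1)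
      constructor
      · have hr : (pc + 1) * (p.length : Int) = pc * p.length + p.length := by ring
        simp only [addFst]
        omega
      · simpa [addFst] using ih2
    · have hA := failRun p p cs 0 pc [] (by simp) hpre rfl
      rw [hA]
      obtain ⟨f, hf⟩ : ∃ f, cs.length + 1 = f + 1 := ⟨cs.length, rfl⟩
      rw [hf]
      simp only [loopB]
      rw [if_neg (by simpa [List.prefix_iff_eq_take, eq_comm] using hpre)]
      simp

-- ===== VERDICT (by name: the statement is the Claim_ definition above) =====
theorem next_pattern_index_spec : Claim_equal_next_pattern_index := by
  intro cs p _ hpre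
  unfold Spec_next_pattern_index next_pattern_index next_pattern_index_alt
  by_cases hp : p = []
  · subst hp
    rcases hpre with h | h
    · exact absurd rfl h
    · subst h; simp [loopA]
  · rw [if_neg (by simpa [List.length_eq_zero_iff] using hp)]
    obtain ⟨h1, h2⟩ := mainAB p hp cs.length cs le_rfl 0
    have : (loopA cs p cs.length 0 0 0 []).1 = (loopB p (cs.length + 1) cs 0).1 := by
      simpa using h1
    exact Prod.ext this h2
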